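-- pv_equiv track=rewrite | github.com/BETSRG/GHEDesigner | ghedesigner/ground_loads.py | first_month_hour
-- ===== SOURCE A (Python) =====
-- def monthdays(month, year):
--     leap_year = year % 4 == 0
--     if month > 12:
--         md = month % 12
--     else:
--         md = month
--     if leap_year:
--         num_days = [31, 31, 29, 31, 30, 31, 30, 31, 31, 30, 31, 30, 31]
--     else:
--         num_days = [31, 31, 28, 31, 30, 31, 30, 31, 31, 30, 31, 30, 31]
--     return num_days[md]
--
-- def first_month_hour(month, years):
--     fmh = 1
--     if month > 1:
--         for i in range(1, month):
--             if len(years) > 1: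
--                 current_year = years[(month - 1) // 12]
--             else:
--                 current_year = years[0]
--             mi = i % 12
--             fmh = fmh + 24 * monthdays(mi, current_year)
--     return fmh
-- ===== SOURCE B (Python) =====
-- _PREFIX = [0, 31, 59, 90, 120, 151, 181, 212, 243, 273, 304, 334]
-- _PREFIX_LEAP = [0, 31, 60, 91, 121, 152, 182, 213, 244, 274, 305, 335]
--
-- def first_month_hour(month, years):
--     if month <= 1:
--         return 1
--     year = years[(month - 1) // 12] if len(years) > 1 else years[0]
--     q, r = divmod(month - 1, 12)
--     if year % 4 == 0:
--         return 1 + 24 * (366 * q + _PREFIX_LEAP[r])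
--     return 1 + 24 * (365 * q + _PREFIX[r])
-- ===== Notes on version B (the rewrite author's own statement) =====
-- stated objective: faster
-- what changed: Replaces the month-by-month accumulation loop with an O(1) closed form: (month-1) is split into full 12-month periods (365/366 days each, by the fixed year's leap flag) plus a constant prefix-sum table lookup for the remaining months.
import Mathlib
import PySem

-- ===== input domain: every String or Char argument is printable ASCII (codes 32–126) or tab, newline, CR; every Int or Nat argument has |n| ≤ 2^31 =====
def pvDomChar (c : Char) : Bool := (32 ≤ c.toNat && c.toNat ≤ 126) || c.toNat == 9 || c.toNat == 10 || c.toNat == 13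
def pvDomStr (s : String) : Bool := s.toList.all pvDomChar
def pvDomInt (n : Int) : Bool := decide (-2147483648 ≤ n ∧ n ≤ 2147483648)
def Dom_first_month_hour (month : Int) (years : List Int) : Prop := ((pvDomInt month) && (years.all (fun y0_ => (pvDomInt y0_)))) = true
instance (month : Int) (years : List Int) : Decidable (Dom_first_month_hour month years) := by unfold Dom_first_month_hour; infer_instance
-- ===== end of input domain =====

-- B replaces A's O(month) month-by-month loop by an O(1) closed form: full 12-month
-- periods times 365/366 days plus a prefix-sum table for the remaining months.

-- ===== PORT A =====
-- A's helper monthdays; list indexing ported with pyGet? (getD 0 is never hit on Pre_: A's calls index in range)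
def monthdaysA (month : Int) (year : Int) : Int :=
  let leap_year : Bool := PySem.Int.mod year 4 == 0
  let md : Int := if month > 12 then PySem.Int.mod month 12 else month
  let num_days : List Int :=
    if leap_year then [31, 31, 29, 31, 30, 31, 30, 31, 31, 30, 31, 30, 31]
    else [31, 31, 28, 31, 30, 31, 30, 31, 31, 30, 31, 30, 31]
  (PySem.List.pyGet? num_days md).getD 0

def first_month_hour (month : Int) (years : List Int) : Int :=
  let fmh : Int := 1
  if month > 1 then
    (PySem.List.pyRange 1 month 1).foldl (fun fmh i =>
      let current_year : Int :=
        if years.length > 1 then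
          (PySem.List.pyGet? years (PySem.Int.floordiv (month - 1) 12)).getD 0
        else (PySem.List.pyGet? years 0).getD 0
      let mi : Int := PySem.Int.mod i 12
      fmh + 24 * monthdaysA mi current_year) fmh
  else fmh

-- ===== PORT B =====
def prefixDays : List Int := [0, 31, 59, 90, 120, 151, 181, 212, 243, 273, 304, 334]
def prefixDaysLeap : List Int := [0, 31, 60, 91, 121, 152, 182, 213, 244, 274, 305, 335]

def first_month_hour_alt (month : Int) (years : List Int) : Int :=
  if month ≤ 1 then 1
  else
    let year : Int :=
      if years.length > 1 then
        (PySem.List.pyGet? years (PySem.Int.floordiv (month - 1) 12)).getD 0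
      else (PySem.List.pyGet? years 0).getD 0
    let q : Int := PySem.Int.floordiv (month - 1) 12
    let r : Int := PySem.Int.mod (month - 1) 12
    if PySem.Int.mod year 4 == 0 then 1 + 24 * (366 * q + prefixDaysLeap.getD r.toNat 0)
    else 1 + 24 * (365 * q + prefixDays.getD r.toNat 0)

-- ===== PRECONDITION & SPEC =====
-- Pre_ excludes exactly the inputs where A raises IndexError on years (month > 1 with
-- years empty, or len(years) > 1 and (month-1)//12 ≥ len(years)); B raises there too.
def Pre_first_month_hour (month : Int) (years : List Int) : Prop :=
  month ≤ 1 ∨ (years ≠ [] ∧ (years.length ≤ 1 ∨ PySem.Int.floordiv (month - 1) 12 < years.length))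
instance (month : Int) (years : List Int) : Decidable (Pre_first_month_hour month years) := by
  unfold Pre_first_month_hour; infer_instance
def pvWitness_first_month_hour : Int × List Int := (14, [2000, 2001])

def Spec_first_month_hour (month : Int) (years : List Int) (out : Int) : Prop := out = first_month_hour_alt month years
instance (month : Int) (years : List Int) (out : Int) : Decidable (Spec_first_month_hour month years out) := by unfold Spec_first_month_hour; infer_instance

-- ===== CLAIM (what is proved, stated in full; the proofs are below) =====
def Claim_equal_first_month_hour : Prop := ∀ (month : Int) (years : List Int), Dom_first_month_hour month years → Pre_first_month_hour month years → Spec_first_month_hour month years (first_month_hour month years)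

-- ===== LEMMAS AND PROOFS =====

-- the per-iteration hour increment of A's loop, for a fixed year
def stepHours (year : Int) (i : Int) : Int := 24 * monthdaysA (PySem.Int.mod i 12) year

-- A's loop sum for k iterations (i = 1..k)
def loopSum (year : Int) : Nat → Int
  | 0 => 0
  | k + 1 => loopSum year k + stepHours year ((k : Int) + 1)

def yearHours (leap : Bool) : Int := if leap then 366 else 365
def prefTab (leap : Bool) : List Int := if leap then prefixDaysLeap else prefixDays
def dayTab (leap : Bool) : List Int :=
  if leap then [31, 31, 29, 31, 30, 31, 30, 31, 31, 30, 31, 30]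
  else [31, 31, 28, 31, 30, 31, 30, 31, 31, 30, 31, 30]

lemma monthdays_small (year : Int) (r : Nat) (h : r < 12) :
    monthdaysA (r : Int) year = (dayTab (PySem.Int.mod year 4 == 0)).getD r 0 := by
  interval_cases r <;> by_cases hd : (4 : Int) ∣ year <;>
    simp [monthdaysA, dayTab, hd, PySem.List.pyGet?, PySem.List.pyIdx?]

lemma step_eq (year : Int) (k : Nat) :
    stepHours year ((k : Int) + 1) = 24 * (dayTab (PySem.Int.mod year 4 == 0)).getD ((k + 1) % 12) 0 := by
  have h1 : ((k : Int) + 1) = ((k + 1 : Nat) : Int) := by push_cast; ring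
  have h2 : PySem.Int.mod ((k + 1 : Nat) : Int) 12 = (((k + 1) % 12 : Nat) : Int) := by
    exact_mod_cast PySem.Int.mod_natCast (k + 1) 12
  rw [stepHours, h1, h2, monthdays_small year _ (Nat.mod_lt _ (by norm_num))]

lemma loopSum_closed (year : Int) (k : Nat) :
    loopSum year k =
      24 * (yearHours (PySem.Int.mod year 4 == 0) * ((k / 12 : Nat) : Int)
            + (prefTab (PySem.Int.mod year 4 == 0)).getD (k % 12) 0) := by
  induction k with
  | zero => cases hb : (PySem.Int.mod year 4 == 0) <;>
      simp [loopSum, prefTab, prefixDays, prefixDaysLeap]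
  | succ k ih =>
    rw [loopSum, ih, step_eq]
    by_cases h11 : k % 12 = 11
    · have e1 : (k + 1) % 12 = 0 := by omega
      have e2 : (k + 1) / 12 = k / 12 + 1 := by omega
      rw [e1, e2, h11]
      cases hb : (PySem.Int.mod year 4 == 0) <;>
        · simp [yearHours, prefTab, dayTab, prefixDays, prefixDaysLeap]
          omega
    · have hlt : k % 12 < 11 := by omega
      have e1 : (k + 1) % 12 = k % 12 + 1 := by omega
      have e2 : (k + 1) / 12 = k / 12 := by omega
      rw [e1, e2]
      set r := k % 12 with hrd
      cases hb : (PySem.Int.mod year 4 == 0) <;>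
        · simp [yearHours, prefTab, dayTab, prefixDays, prefixDaysLeap]
          interval_cases r <;> simp <;> omega

lemma foldl_loop (year : Int) (n : Nat) :
    (PySem.List.pyRange 1 ((n : Int) + 1) 1).foldl (fun acc i => acc + stepHours year i) 1
      = 1 + loopSum year n := by
  induction n with
  | zero => simp [PySem.List.pyRange_one_eq_nil (by norm_num : (1:Int) ≤ 1), loopSum]
  | succ n ih =>
    have hle : (1 : Int) ≤ (n : Int) + 1 := by omega
    have : ((n + 1 : Nat) : Int) + 1 = ((n : Int) + 1) + 1 := by push_cast; ring
    rw [this, PySem.List.pyRange_one_succ_right hle, List.foldl_append, ih]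
    simp [loopSum]
    ring

-- ===== VERDICT (by name: the statement is the Claim_ definition above) =====
theorem first_month_hour_spec : Claim_equal_first_month_hour := by
  intro month years _ hpre
  unfold Spec_first_month_hour
  by_cases hm : month > 1
  · -- the year both programs pick (constant through A's loop)
    set year : Int :=
      (if years.length > 1 then
          (PySem.List.pyGet? years (PySem.Int.floordiv (month - 1) 12)).getD 0
        else (PySem.List.pyGet? years 0).getD 0) with hyear
    set n : Nat := (month - 1).toNat with hn
    have hmn : month = (n : Int) + 1 := by omega
    have hA : first_month_hour month years = 1 + loopSum year n := by
      rw [first_month_hour, if_pos hm]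
      have hbody : (fun (fmh : Int) (i : Int) =>
          let current_year : Int :=
            if years.length > 1 then
              (PySem.List.pyGet? years (PySem.Int.floordiv (month - 1) 12)).getD 0
            else (PySem.List.pyGet? years 0).getD 0
          let mi : Int := PySem.Int.mod i 12
          fmh + 24 * monthdaysA mi current_year)
          = (fun acc i => acc + stepHours year i) := by
        funext acc i; simp [stepHours, hyear]
      rw [hbody, hmn, foldl_loop]
    have hq : PySem.Int.floordiv (month - 1) 12 = ((n / 12 : Nat) : Int) := by
      rw [hmn]; simp
    have hrm : PySem.Int.mod (month - 1) 12 = ((n % 12 : Nat) : Int) := by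
      rw [hmn]; simp
    have hB : first_month_hour_alt month years =
        1 + 24 * (yearHours (PySem.Int.mod year 4 == 0) * ((n / 12 : Nat) : Int)
              + (prefTab (PySem.Int.mod year 4 == 0)).getD (n % 12) 0) := by
      rw [first_month_hour_alt, if_neg (by omega)]
      have hyear' : year =
          (if years.length > 1 then (PySem.List.pyGet? years ((n / 12 : Nat) : Int)).getD 0
           else (PySem.List.pyGet? years 0).getD 0) := by rw [hyear, hq]
      simp only [hq, hrm, Int.toNat_natCast, ← hyear']
      cases hb : (PySem.Int.mod year 4 == 0) <;>
        simp only [hb, Bool.false_eq_true, if_false, if_true, yearHours, prefTab] <;>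
          first | ring | rfl
    rw [hA, hB, loopSum_closed]
  · rw [first_month_hour_alt, if_pos (by omega), first_month_hour, if_neg hm]
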